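-- pv_equiv track=rewrite | github.com/8bitGames/hybe-hydra | backend/compose-engine/app/effects/selector.py | get_visual_category
-- ===== SOURCE A (Python) =====
-- EFFECT_TO_CATEGORY = {}
--
-- def get_visual_category(effect_id: str) -> str:
--     """Get the visual category for an effect.
--
--     Returns the category name or 'unknown' if not mapped.
--     Effects in different categories look visually distinct.
--     """
--     effect_lower = effect_id.lower()
--
--     # Direct lookup
--     if effect_lower in EFFECT_TO_CATEGORY:
--         return EFFECT_TO_CATEGORY[effect_lower]
--
--     # Keyword-based fallback
--     if "fade" in effect_lower or "dissolve" in effect_lower: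
--         return "fade"
--     if "wipe" in effect_lower or "slide" in effect_lower or "smooth" in effect_lower:
--         if any(d in effect_lower for d in ["left", "right"]):
--             return "wipe_horizontal"
--         if any(d in effect_lower for d in ["up", "down"]):
--             return "wipe_vertical"
--     if "zoom" in effect_lower or "circle" in effect_lower or "radial" in effect_lower:
--         return "zoom_radial"
--     if "diag" in effect_lower or "horz" in effect_lower or "vert" in effect_lower:
--         return "geometric"
--     if "pixel" in effect_lower or "squeeze" in effect_lower or "morph" in effect_lower:
--         return "distortion"
--     if "glitch" in effect_lower or "random" in effect_lower:
--         return "glitch_modern"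
--     if "blur" in effect_lower or "bounce" in effect_lower:
--         return "blur_soft"
--
--     return "unknown"
-- ===== SOURCE B (Python) =====
-- EFFECT_TO_CATEGORY = {}
--
-- # Priority-ranked keyword groups; group 1 (wipe/slide/smooth) is directional
-- # and only counts as matched when a direction keyword is also present.
-- _GROUPS = [
--     (0, ("fade", "dissolve"), "fade"),
--     (1, ("wipe", "slide", "smooth"), ""),  # resolved via _direction
--     (2, ("zoom", "circle", "radial"), "zoom_radial"),
--     (3, ("diag", "horz", "vert"), "geometric"),
--     (4, ("pixel", "squeeze", "morph"), "distortion"),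
--     (5, ("glitch", "random"), "glitch_modern"),
--     (6, ("blur", "bounce"), "blur_soft"),
-- ]
--
--
-- def _direction(s):
--     if "left" in s or "right" in s:
--         return "wipe_horizontal"
--     if "up" in s or "down" in s:
--         return "wipe_vertical"
--     return None
--
--
-- def get_visual_category(effect_id: str) -> str:
--     """Get the visual category for an effect.
--
--     Returns the category name or 'unknown' if not mapped.
--     """
--     s = effect_id.lower()
--     if s in EFFECT_TO_CATEGORY:
--         return EFFECT_TO_CATEGORY[s]
--
--     # collect ALL matching groups, then take the best (lowest) priority
--     matched = {p for p, kws, _ in _GROUPS if any(k in s for k in kws)}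
--     direction = _direction(s)
--     if direction is None:
--         matched.discard(1)
--     if not matched:
--         return "unknown"
--     best = min(matched)
--     if best == 1:
--         return direction
--     return next(cat for p, _, cat in _GROUPS if p == best)
-- ===== Notes on version B (the rewrite author's own statement) =====
-- stated objective: alternative
-- what changed: Replaces A's first-match if-chain with a collect-then-reduce algorithm: B gathers the set of ALL matching priority-ranked keyword groups in one comprehension, drops the directional wipe group when no direction keyword is present, and resolves the answer by taking the minimum priority of the matched set.
import Mathlib
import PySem

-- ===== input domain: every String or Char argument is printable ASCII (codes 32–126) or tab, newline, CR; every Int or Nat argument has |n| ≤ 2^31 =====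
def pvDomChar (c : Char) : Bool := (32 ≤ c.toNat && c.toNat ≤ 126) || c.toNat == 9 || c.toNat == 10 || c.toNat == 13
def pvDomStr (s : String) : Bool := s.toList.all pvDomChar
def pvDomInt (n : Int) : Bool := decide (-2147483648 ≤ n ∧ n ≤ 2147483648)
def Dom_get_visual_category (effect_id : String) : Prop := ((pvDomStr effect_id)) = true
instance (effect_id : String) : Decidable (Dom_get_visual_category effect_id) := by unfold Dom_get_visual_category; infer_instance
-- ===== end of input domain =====

-- B replaces A's first-match if-chain by a collect-then-reduce algorithm: it gathers the
-- set of ALL matching priority-ranked keyword groups, drops the directional wipe group when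
-- no direction keyword is present, and answers with the minimum matched priority; objective:
-- alternative, same behaviour.

-- ===== PORT A =====
def EFFECT_TO_CATEGORY : PySem.Dict String String := PySem.Dict.empty

def get_visual_category (effect_id : String) : String :=
  let effect_lower := PySem.Str.lower effect_id
  -- Direct lookup
  match EFFECT_TO_CATEGORY.get? effect_lower with
  | some v => v
  | none =>
    -- Keyword-based fallback
    if PySem.Str.isIn "fade" effect_lower || PySem.Str.isIn "dissolve" effect_lower then "fade"
    else if PySem.Str.isIn "wipe" effect_lower || PySem.Str.isIn "slide" effect_lower || PySem.Str.isIn "smooth" effect_lower then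
      if ["left", "right"].any (fun d => PySem.Str.isIn d effect_lower) then "wipe_horizontal"
      else if ["up", "down"].any (fun d => PySem.Str.isIn d effect_lower) then "wipe_vertical"
      else pvAfterWipe effect_lower
    else pvAfterWipe effect_lower
where
  -- the if-chain below the wipe block (reached both when the wipe condition is false and
  -- when it is true but neither direction matches — Python falls out of the nested ifs)
  pvAfterWipe (effect_lower : String) : String :=
    if PySem.Str.isIn "zoom" effect_lower || PySem.Str.isIn "circle" effect_lower || PySem.Str.isIn "radial" effect_lower then "zoom_radial"
    else if PySem.Str.isIn "diag" effect_lower || PySem.Str.isIn "horz" effect_lower || PySem.Str.isIn "vert" effect_lower then "geometric"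
    else if PySem.Str.isIn "pixel" effect_lower || PySem.Str.isIn "squeeze" effect_lower || PySem.Str.isIn "morph" effect_lower then "distortion"
    else if PySem.Str.isIn "glitch" effect_lower || PySem.Str.isIn "random" effect_lower then "glitch_modern"
    else if PySem.Str.isIn "blur" effect_lower || PySem.Str.isIn "bounce" effect_lower then "blur_soft"
    else "unknown"

-- ===== PORT B =====
def EFFECT_TO_CATEGORY_B : PySem.Dict String String := PySem.Dict.empty

def pvGroups : List (Int × List String × String) :=
  [ (0, (["fade", "dissolve"], "fade")),
    (1, (["wipe", "slide", "smooth"], "")),  -- directional, resolved via pvDirection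
    (2, (["zoom", "circle", "radial"], "zoom_radial")),
    (3, (["diag", "horz", "vert"], "geometric")),
    (4, (["pixel", "squeeze", "morph"], "distortion")),
    (5, (["glitch", "random"], "glitch_modern")),
    (6, (["blur", "bounce"], "blur_soft")) ]

def pvDirection (s : String) : Option String :=
  if PySem.Str.isIn "left" s || PySem.Str.isIn "right" s then some "wipe_horizontal"
  else if PySem.Str.isIn "up" s || PySem.Str.isIn "down" s then some "wipe_vertical"
  else none

def get_visual_category_alt (effect_id : String) : String :=
  let s := PySem.Str.lower effect_id
  match EFFECT_TO_CATEGORY_B.get? s with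
  | some v => v
  | none =>
    -- collect ALL matching groups, then take the best (lowest) priority
    let matched : PySem.Set Int :=
      PySem.Set.ofList ((pvGroups.filter
        (fun g => g.2.1.any (fun k => PySem.Str.isIn k s))).map (fun g => g.1))
    let direction := pvDirection s
    let matched : PySem.Set Int :=
      match direction with
      | none => PySem.Set.discard matched 1
      | some _ => matched
    match PySem.List.min? matched (fun x => x) with
    | none => "unknown"                       -- 'if not matched'
    | some best =>
      if best == 1 then
        -- direction is necessarily some here: 1 survives the discard only with a direction
        match direction with
        | some d => d
        | none => ""
      else
        -- next(cat for p, _, cat in _GROUPS if p == best); always found, as best ∈ matched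
        match pvGroups.find? (fun g => g.1 == best) with
        | some g => g.2.2
        | none => ""

-- ===== PRECONDITION & SPEC =====
def Spec_get_visual_category (effect_id : String) (out : String) : Prop := out = get_visual_category_alt effect_id
instance (effect_id : String) (out : String) : Decidable (Spec_get_visual_category effect_id out) := by unfold Spec_get_visual_category; infer_instance

-- ===== CLAIM (what is proved, stated in full; the proofs are below) =====
def Claim_equal_get_visual_category : Prop := ∀ (effect_id : String), Dom_get_visual_category effect_id → Spec_get_visual_category effect_id (get_visual_category effect_id)

-- ===== LEMMAS AND PROOFS =====

-- ===== VERDICT (by name: the statement is the Claim_ definition above) =====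
theorem get_visual_category_spec : Claim_equal_get_visual_category := by
  intro s _
  unfold Spec_get_visual_category get_visual_category get_visual_category_alt
  simp only [EFFECT_TO_CATEGORY, EFFECT_TO_CATEGORY_B, PySem.Dict.get?_empty,
    pvGroups, pvDirection, get_visual_category.pvAfterWipe,
    List.filter, List.any_cons, List.any_nil, List.find?,
    Bool.or_false, Bool.or_assoc]
  generalize (PySem.Str.isIn "fade" (PySem.Str.lower s) || PySem.Str.isIn "dissolve" (PySem.Str.lower s)) = c0
  generalize (PySem.Str.isIn "wipe" (PySem.Str.lower s) || (PySem.Str.isIn "slide" (PySem.Str.lower s) || PySem.Str.isIn "smooth" (PySem.Str.lower s))) = c1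
  generalize (PySem.Str.isIn "left" (PySem.Str.lower s) || PySem.Str.isIn "right" (PySem.Str.lower s)) = dh
  generalize (PySem.Str.isIn "up" (PySem.Str.lower s) || PySem.Str.isIn "down" (PySem.Str.lower s)) = dv
  generalize (PySem.Str.isIn "zoom" (PySem.Str.lower s) || (PySem.Str.isIn "circle" (PySem.Str.lower s) || PySem.Str.isIn "radial" (PySem.Str.lower s))) = c2
  generalize (PySem.Str.isIn "diag" (PySem.Str.lower s) || (PySem.Str.isIn "horz" (PySem.Str.lower s) || PySem.Str.isIn "vert" (PySem.Str.lower s))) = c3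
  generalize (PySem.Str.isIn "pixel" (PySem.Str.lower s) || (PySem.Str.isIn "squeeze" (PySem.Str.lower s) || PySem.Str.isIn "morph" (PySem.Str.lower s))) = c4
  generalize (PySem.Str.isIn "glitch" (PySem.Str.lower s) || PySem.Str.isIn "random" (PySem.Str.lower s)) = c5
  generalize (PySem.Str.isIn "blur" (PySem.Str.lower s) || PySem.Str.isIn "bounce" (PySem.Str.lower s)) = c6
  cases c0 <;> cases c1 <;> cases dh <;> cases dv <;> cases c2 <;> cases c3 <;>
    cases c4 <;> cases c5 <;> cases c6 <;> rfl
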